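-- pv_equiv track=rewrite | github.com/t-jank/Samostabilizacja | MutualExclusion.py | MutualExclusion
-- ===== SOURCE A (Python) =====
-- def move(P,x):
--     if x==0:
--         P[x] = (P[x]+1) % (len(P)+1)
--     else:
--         P[x] = P[x-1]
--     return P
--
-- def MutualExclusion(n,P,step):
--     worst_case = step
--     SK = [1]*n
--     if P[0] == P[n-1]:
--         SK[0] = 1
--     else:
--         SK[0] = 0
--     for i in range(1,n):
--         if P[i] != P[i-1]:
--             SK[i] = 1
--         else:
--             SK[i] = 0
--     if sum(SK) == 1:
--         return worst_case
--
--     for s in range(0,n):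
--         if SK[s]==1:
--             powrot_guarantee = P[s]
--             worst_case = max(worst_case, MutualExclusion(n,move(P,s), step+1))
--             P[s] = powrot_guarantee
--     return worst_case
-- ===== SOURCE B (Python) =====
-- def MutualExclusion(n, P, step):
--     # Bounded Bellman value-iteration over the BFS-explored reachable configurations:
--     # per configuration one table entry holding the longest remaining run, instead of
--     # A's one recursion subtree per schedule.
--     m = len(P) + 1
--
--     def enabled(Q):
--         return [i for i in range(n)
--                 if (Q[i] == Q[n - 1] if i == 0 else Q[i] != Q[i - 1])]
--
--     def succs(Q):
--         en = enabled(Q)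
--         if len(en) == 1:          # stabilized: A stops here
--             return []
--         out = []
--         for s in en:
--             R = list(Q)
--             if s == 0:
--                 R[0] = (R[0] + 1) % m
--             else:
--                 R[s] = R[s - 1]
--             out.append(tuple(R))
--         return out
--
--     start = tuple(P)
--     states = [start]
--     frontier = [start]
--     while frontier:
--         new = []
--         for Q in frontier:
--             for R in succs(Q):
--                 if R not in states and R not in new:
--                     new.append(R)
--         states = states + new
--         frontier = new
--
--     T = 4 * n * n + 4 * n + 16    # an upper bound on the longest execution length
--     d = {Q: 0 for Q in states}
--     for _ in range(T):
--         nd = {}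
--         for Q in states:
--             v = 0
--             for R in succs(Q):
--                 v = max(v, 1 + d[R])
--             nd[Q] = v
--         d = nd
--     return step + d[start]
-- ===== Notes on version B (the rewrite author's own statement) =====
-- stated objective: alternative
-- what changed: A explores every scheduling of the token ring as a recursion tree; B enumerates the reachable configurations once by BFS and computes the longest remaining run of each configuration with a bounded Bellman value-iteration (4n^2+4n+16 sweeps, an upper bound on the run length), reading the answer off a table instead of recursing per schedule.
import Mathlib
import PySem

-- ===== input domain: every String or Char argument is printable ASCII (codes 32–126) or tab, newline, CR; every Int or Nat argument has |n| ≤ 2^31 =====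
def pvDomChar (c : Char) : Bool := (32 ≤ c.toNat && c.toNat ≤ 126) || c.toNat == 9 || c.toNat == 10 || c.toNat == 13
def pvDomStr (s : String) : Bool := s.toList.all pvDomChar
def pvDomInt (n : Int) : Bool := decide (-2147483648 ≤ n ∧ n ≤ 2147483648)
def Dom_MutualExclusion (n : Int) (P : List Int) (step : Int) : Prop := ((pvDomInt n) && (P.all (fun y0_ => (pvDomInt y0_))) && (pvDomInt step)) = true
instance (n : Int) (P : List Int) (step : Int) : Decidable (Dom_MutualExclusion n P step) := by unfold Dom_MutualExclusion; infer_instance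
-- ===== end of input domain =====

-- B replaces A's recursive exploration of every schedule (a tree) by a BFS of the reachable
-- configurations followed by a bounded Bellman value-iteration computing per configuration the
-- length of the longest remaining run; each configuration is a table entry instead of a subtree.
-- A restores its in-place mutation of P before returning; the equivalence is about return values.

-- 4*n*n + 4*n + 16 bounds the length of the longest execution (Dijkstra's K-state ring with
-- K = len(P)+1 > n stabilizes within O(n^2) moves); both ports use it as recursion fuel /
-- as B's fixed number of Bellman sweeps (the same constant Source B uses).
def pvBound (n : Int) : Nat := (4 * n * n + 4 * n + 16).toNat

-- ===== PORT A =====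
-- move(P, x): in Lean the update is pure (A restores P afterwards, so its recursion is pure too)
def pyMove (P : List Int) (x : Int) : List Int :=
  if x == 0 then
    PySem.List.pySetD P x (PySem.Int.mod (PySem.List.pyGetD P x 0 + 1) ((P.length : Int) + 1))
  else
    PySem.List.pySetD P x (PySem.List.pyGetD P (x - 1) 0)

-- the recursive body of A, with fuel (Python has no fuel; pvBound n exceeds the recursion depth)
def MEgo : Nat → Int → List Int → Int → Int
  | 0, _, _, step => step
  | f + 1, n, P, step =>
    -- SK = [1]*n ; SK[0] = 1 if P[0]==P[n-1] else 0 ; loop setting SK[i] for i in range(1,n)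
    let SK1 := PySem.List.pySetD (List.replicate n.toNat (1 : Int)) 0
        (if PySem.List.pyGetD P 0 0 == PySem.List.pyGetD P (n - 1) 0 then 1 else 0)
    let SK := (PySem.List.pyRange 1 n 1).foldl
        (fun SK i => PySem.List.pySetD SK i
          (if PySem.List.pyGetD P i 0 != PySem.List.pyGetD P (i - 1) 0 then 1 else 0)) SK1
    if SK.sum = 1 then step
    else (PySem.List.pyRange 0 n 1).foldl
        (fun w s => if PySem.List.pyGetD SK s 0 == 1
                    then max w (MEgo f n (pyMove P s) (step + 1)) else w) step

def MutualExclusion (n : Int) (P : List Int) (step : Int) : Int :=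
  MEgo (pvBound n) n P step

-- ===== PORT B =====
-- enabled(Q): indices i in range(n) whose guard holds
def altEnabled (n : Int) (Q : List Int) : List Int :=
  (PySem.List.pyRange 0 n 1).filter
    (fun i => if i == 0 then PySem.List.pyGetD Q i 0 == PySem.List.pyGetD Q (n - 1) 0
              else PySem.List.pyGetD Q i 0 != PySem.List.pyGetD Q (i - 1) 0)

-- succs(Q): [] when stabilized (exactly one enabled), else the moved configurations
def altSuccs (n m : Int) (Q : List Int) : List (List Int) :=
  let en := altEnabled n Q
  if en.length == 1 then []
  else en.foldl (fun out s => out ++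
    [if s == 0 then PySem.List.pySetD Q 0 (PySem.Int.mod (PySem.List.pyGetD Q 0 0 + 1) m)
     else PySem.List.pySetD Q s (PySem.List.pyGetD Q (s - 1) 0)]) []

-- one BFS round: new states found from the frontier (R not in states and not in new)
def altCollect (n m : Int) (states frontier : List (List Int)) : List (List Int) :=
  frontier.foldl (fun new Q =>
    (altSuccs n m Q).foldl (fun new R =>
      if R ∈ states ∨ R ∈ new then new else new ++ [R]) new) []

-- the 'while frontier:' loop of Source B, fueled (pvBound n exceeds the number of rounds)
def altBFS (n m : Int) : Nat → List (List Int) → List (List Int) → List (List Int)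
  | 0, states, _ => states
  | f + 1, states, frontier =>
    if frontier = [] then states
    else
      let new := altCollect n m states frontier
      altBFS n m f (states ++ new) new

-- v = max(0, 1 + d[R] for R in succs(Q))   (d[R]: key present whenever BFS closed; getD is exact there)
def altVal (n m : Int) (d : PySem.Dict (List Int) Int) (Q : List Int) : Int :=
  (altSuccs n m Q).foldl (fun v R => max v (1 + d.getD R 0)) 0

-- one Bellman sweep: nd = {Q: v(Q) for Q in states}
def altSweep (n m : Int) (states : List (List Int)) (d : PySem.Dict (List Int) Int) :
    PySem.Dict (List Int) Int :=
  states.foldl (fun nd Q => nd.insert Q (altVal n m d Q)) PySem.Dict.empty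

-- 'for _ in range(T): d = sweep(d)'
def altIter (n m : Int) (states : List (List Int)) :
    Nat → PySem.Dict (List Int) Int → PySem.Dict (List Int) Int
  | 0, d => d
  | k + 1, d => altIter n m states k (altSweep n m states d)

def MutualExclusion_alt (n : Int) (P : List Int) (step : Int) : Int :=
  let m : Int := (P.length : Int) + 1
  let states := altBFS n m (pvBound n) [P] [P]
  let d0 := states.foldl (fun d Q => d.insert Q (0 : Int)) PySem.Dict.empty
  let d := altIter n m states (pvBound n) d0
  step + d.getD P 0

-- ===== PRECONDITION & SPEC =====
-- A raises IndexError (P[0], P[n-1] or SK[0]) unless 1 ≤ n ≤ len(P); Pre_ is exactly where A returns.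
def Pre_MutualExclusion (n : Int) (P : List Int) (step : Int) : Prop :=
  1 ≤ n ∧ n ≤ (P.length : Int)
instance (n : Int) (P : List Int) (step : Int) : Decidable (Pre_MutualExclusion n P step) := by
  unfold Pre_MutualExclusion; infer_instance

def pvWitness_MutualExclusion : Int × List Int × Int := (3, [1, 2, 0], 0)

def Spec_MutualExclusion (n : Int) (P : List Int) (step : Int) (out : Int) : Prop :=
  out = MutualExclusion_alt n P step
instance (n : Int) (P : List Int) (step : Int) (out : Int) :
    Decidable (Spec_MutualExclusion n P step out) := by unfold Spec_MutualExclusion; infer_instance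

-- ===== CLAIM (what is proved, stated in full; the proofs are below) =====
def Claim_equal_MutualExclusion : Prop := ∀ (n : Int) (P : List Int) (step : Int),
  Dom_MutualExclusion n P step → Pre_MutualExclusion n P step →
  Spec_MutualExclusion n P step (MutualExclusion n P step)

-- ===== LEMMAS AND PROOFS =====

def dRec (n m : Int) : Nat → List Int → Int
  | 0, _ => 0
  | k + 1, Q => (altSuccs n m Q).foldl (fun v R => max v (1 + dRec n m k R)) 0

inductive StepsN (n m : Int) : Nat → List Int → List Int → Prop
  | zero (Q) : StepsN n m 0 Q Q
  | succ {k : Nat} {Q M R : List Int} :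
      M ∈ altSuccs n m Q → StepsN n m k M R → StepsN n m (k + 1) Q R

theorem length_pyMove (P : List Int) (s : Int) : (pyMove P s).length = P.length := by
  unfold pyMove; split <;> simp [PySem.List.length_pySetD]

theorem length_foldl_pySetD (l : List Int) (g : Int → Int) (base : List Int) :
    (l.foldl (fun SK i => PySem.List.pySetD SK i (g i)) base).length = base.length := by
  induction l generalizing base with
  | nil => rfl
  | cons i t ih => simpa [List.foldl_cons, PySem.List.length_pySetD] using ih (PySem.List.pySetD base i (g i))

theorem getD_foldl_pySetD (l : List Int) (g : Int → Int) (base : List Int) (j : Nat)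
    (hl : ∀ i ∈ l, 0 ≤ i) :
    (l.foldl (fun SK i => PySem.List.pySetD SK i (g i)) base).getD j 0
      = if (j : Int) ∈ l ∧ j < base.length then g j else base.getD j 0 := by
  induction l generalizing base with
  | nil => simp
  | cons i t ih =>
    have hi : 0 ≤ i := hl i (by simp)
    have hset : PySem.List.pySetD base i (g i) = base.set i.toNat (g i) :=
      PySem.List.pySetD_of_nonneg _ _ hi
    rw [List.foldl_cons, ih _ (fun x hx => hl x (List.mem_cons_of_mem _ hx))]
    rw [hset]
    simp only [List.length_set, List.getD_eq_getElem?_getD, List.getElem?_set]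
    by_cases hjt : (j : Int) ∈ t
    · simp only [hjt, true_and, List.mem_cons, or_true]
      split
      · rfl
      · rename_i hjlen
        have h1 : ¬ i.toNat = j ∨ ¬ i.toNat < base.length := by omega
        rcases h1 with h1 | h1
        · simp [h1]
        · simp only [h1, if_false]
          split
          · rename_i h2
            simp [List.getElem?_eq_none (by omega : base.length ≤ j)]
          · rfl
    · by_cases hji : (j : Int) = i
      · have hij : i.toNat = j := by omega
        by_cases hrange : j < base.length <;>
          simp [hji, hij, hrange]
      · have hne : ¬ i.toNat = j := by omega
        simp [hjt, hji, hne]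
-- the guard of process i, as tested by altEnabled's filter
def enPred (n : Int) (Q : List Int) : Int → Bool := fun i =>
  if i == 0 then PySem.List.pyGetD Q i 0 == PySem.List.pyGetD Q (n - 1) 0
  else PySem.List.pyGetD Q i 0 != PySem.List.pyGetD Q (i - 1) 0

theorem altEnabled_eq (n : Int) (Q : List Int) :
    altEnabled n Q = (PySem.List.pyRange 0 n).filter (enPred n Q) := rfl

-- the SK list A builds
def skOf (n : Int) (P : List Int) : List Int :=
  let SK1 := PySem.List.pySetD (List.replicate n.toNat (1 : Int)) 0
      (if PySem.List.pyGetD P 0 0 == PySem.List.pyGetD P (n - 1) 0 then 1 else 0)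
  (PySem.List.pyRange 1 n 1).foldl
      (fun SK i => PySem.List.pySetD SK i
        (if PySem.List.pyGetD P i 0 != PySem.List.pyGetD P (i - 1) 0 then 1 else 0)) SK1

theorem skOf_eq (n : Int) (P : List Int) (h1 : 1 ≤ n) :
    skOf n P = (PySem.List.pyRange 0 n).map (fun i => if enPred n P i then (1 : Int) else 0) := by
  have hbase : (PySem.List.pySetD (List.replicate n.toNat (1 : Int)) 0
      (if PySem.List.pyGetD P 0 0 == PySem.List.pyGetD P (n - 1) 0 then 1 else 0)).length
        = n.toNat := by
    rw [PySem.List.pySetD_of_nonneg _ _ (le_refl 0)]; simp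
  have hlen : (skOf n P).length = n.toNat := by
    unfold skOf; rw [length_foldl_pySetD]; exact hbase
  apply List.ext_getElem
  · simp [hlen, PySem.List.length_pyRange_one]
  · intro j hj1 hj2
    have hjn : j < n.toNat := by simpa [hlen] using hj1
    rw [← List.getD_eq_getElem _ 0, ← List.getD_eq_getElem _ 0]
    unfold skOf
    rw [getD_foldl_pySetD _ _ _ _ (by intro i hi; rw [PySem.List.mem_pyRange_one] at hi; omega)]
    rw [hbase]
    by_cases hj0 : j = 0
    · subst hj0
      have : ((0 : Nat) : Int) ∉ PySem.List.pyRange 1 n := by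
        rw [PySem.List.mem_pyRange_one]; omega
      rw [if_neg (by tauto)]
      rw [PySem.List.pySetD_of_nonneg _ _ (le_refl 0)]
      have hrep : (0 : Nat) < (List.replicate n.toNat (1:Int)).length := by simp; omega
      rw [List.getD_eq_getElem _ _ (by simpa using hrep)]
      simp only [List.getElem_set, reduceIte]
      rw [List.getD_eq_getElem _ 0 (by simp [PySem.List.length_pyRange_one]; omega),
        List.getElem_map, PySem.List.getElem_pyRange_one]
      norm_num [enPred]
    · have hmem : ((j : Nat) : Int) ∈ PySem.List.pyRange 1 n := by
        rw [PySem.List.mem_pyRange_one]; omega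
      rw [if_pos ⟨hmem, hjn⟩]
      rw [List.getD_eq_getElem _ 0 (by simp [PySem.List.length_pyRange_one]; omega),
        List.getElem_map, PySem.List.getElem_pyRange_one]
      have hbj : ((j : Int) == (0 : Int)) = false := by simp; omega
      norm_num [enPred, hbj]

theorem sum_skOf (n : Int) (P : List Int) (h1 : 1 ≤ n) :
    (skOf n P).sum = ((altEnabled n P).length : Int) := by
  rw [skOf_eq n P h1, altEnabled_eq, PySem.List.sum_map_ite_one_zero,
    List.countP_eq_length_filter]
theorem foldl_max_shift_aux {α : Type} (l : List α) (g : α → Int) (step : Int) :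
    ∀ b : Int, l.foldl (fun w x => max w (step + 1 + g x)) (step + b)
      = step + l.foldl (fun v x => max v (1 + g x)) b := by
  induction l with
  | nil => intro b; rfl
  | cons x t ih =>
    intro b
    simp only [List.foldl_cons]
    rw [add_assoc step 1 (g x), max_add_add_left step b (1 + g x), ih (max b (1 + g x))]

theorem foldl_max_shift {α : Type} (l : List α) (g : α → Int) (step : Int) :
    l.foldl (fun w x => max w (step + 1 + g x)) step
      = step + l.foldl (fun v x => max v (1 + g x)) 0 := by
  simpa using foldl_max_shift_aux l g step 0

-- the move performed by altSuccs coincides with A's move (m = len+1)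
theorem altSuccs_eq_map (n m : Int) (Q : List Int) (hm : m = (Q.length : Int) + 1)
    (hlen : ¬ (altEnabled n Q).length = 1) :
    altSuccs n m Q = (altEnabled n Q).map (fun s => pyMove Q s) := by
  unfold altSuccs
  rw [if_neg (by simpa using hlen)]
  rw [PySem.List.foldl_append_singleton_eq_map]
  simp only [List.nil_append]
  apply List.map_congr_left
  intro s _
  unfold pyMove
  by_cases hs : s = 0
  · subst hs; simp [hm]
  · simp [hs]

theorem altSuccs_stable (n m : Int) (Q : List Int)
    (hlen : (altEnabled n Q).length = 1) : altSuccs n m Q = [] := by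
  unfold altSuccs; rw [if_pos (by simpa using hlen)]

-- A's recursion computes step + (fuel-cut longest-run depth)
theorem MEgo_eq (n : Int) : ∀ (f : Nat) (P : List Int) (step : Int),
    1 ≤ n → n ≤ (P.length : Int) →
    MEgo f n P step = step + dRec n ((P.length : Int) + 1) f P := by
  intro f
  induction f with
  | zero => intro P step _ _; simp [MEgo, dRec]
  | succ f ih =>
    intro P step h1 h2
    show (if (skOf n P).sum = 1 then step
      else (PySem.List.pyRange 0 n 1).foldl
        (fun w s => if PySem.List.pyGetD (skOf n P) s 0 == 1
                    then max w (MEgo f n (pyMove P s) (step + 1)) else w) step)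
      = step + dRec n ((P.length : Int) + 1) (f + 1) P
    rw [sum_skOf n P h1]
    by_cases hst : (altEnabled n P).length = 1
    · rw [if_pos (by rw [hst]; rfl)]
      simp [dRec, altSuccs_stable n _ P hst]
    · rw [if_neg (by simpa using hst)]
      simp only [dRec]
      rw [altSuccs_eq_map n _ P rfl hst, List.foldl_map]
      -- reduce A's guarded loop over range(n) to a loop over the enabled indices
      rw [PySem.List.foldl_congr_mem (PySem.List.pyRange 0 n 1)
        (fun w s => if PySem.List.pyGetD (skOf n P) s 0 == 1
                    then max w (MEgo f n (pyMove P s) (step + 1)) else w)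
        (fun w s => if enPred n P s
                    then max w (MEgo f n (pyMove P s) (step + 1)) else w) step ?_]
      · rw [PySem.List.foldl_if_eq_foldl_filter, ← altEnabled_eq]
        have hme : ∀ (w : Int), ∀ s ∈ altEnabled n P,
            max w (MEgo f n (pyMove P s) (step + 1))
              = max w (step + 1 + dRec n ((P.length : Int) + 1) f (pyMove P s)) := by
          intro w s _
          rw [ih (pyMove P s) (step + 1) h1 (by rw [length_pyMove]; exact h2), length_pyMove]
        rw [PySem.List.foldl_congr_mem _ _ _ _ hme]
        exact foldl_max_shift (altEnabled n P)
          (fun s => dRec n ((P.length : Int) + 1) f (pyMove P s)) step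
      · intro w s hs
        rw [PySem.List.mem_pyRange_one] at hs
        beta_reduce
        rw [skOf_eq n P h1,
          PySem.List.pyGetD_map_pyRange_of_nonneg _ n s 0 (by omega) (by omega)]
        by_cases hp : enPred n P s = true <;> simp [hp]
-- ---- BFS soundness: everything reachable in ≤ fuel steps is in the returned state list ----

theorem inner_fold_sub (states : List (List Int)) (l : List (List Int)) :
    ∀ (acc : List (List Int)), acc ⊆ l.foldl
      (fun new R => if R ∈ states ∨ R ∈ new then new else new ++ [R]) acc := by
  induction l with
  | nil => intro acc; exact fun _ h => h
  | cons x t ih =>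
    intro acc y hy
    simp only [List.foldl_cons]
    apply ih
    split
    · exact hy
    · exact List.mem_append_left _ hy

theorem inner_fold_mem (states : List (List Int)) (l : List (List Int)) :
    ∀ (acc : List (List Int)) (R : List Int), R ∈ l →
      R ∈ states ∨ R ∈ l.foldl
        (fun new R => if R ∈ states ∨ R ∈ new then new else new ++ [R]) acc := by
  induction l with
  | nil => intro _ _ h; cases h
  | cons x t ih =>
    intro acc R hR
    rcases List.mem_cons.mp hR with rfl | hRt
    · by_cases hx : R ∈ states
      · exact Or.inl hx
      · right
        simp only [List.foldl_cons]
        apply inner_fold_sub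
        by_cases hacc : R ∈ acc
        · simp only [if_pos (Or.inr hacc)]; exact hacc
        · rw [if_neg (by tauto)]; exact List.mem_append_right _ (by simp)
    · simpa only [List.foldl_cons] using ih _ R hRt

theorem collect_sub (n m : Int) (states : List (List Int)) (frontier : List (List Int)) :
    ∀ (acc : List (List Int)), acc ⊆ frontier.foldl
      (fun new Q => (altSuccs n m Q).foldl
        (fun new R => if R ∈ states ∨ R ∈ new then new else new ++ [R]) new) acc := by
  induction frontier with
  | nil => intro acc; exact fun _ h => h
  | cons x t ih =>
    intro acc y hy
    simp only [List.foldl_cons]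
    exact ih _ (inner_fold_sub states _ acc hy)

theorem collect_mem (n m : Int) (states frontier : List (List Int))
    (Q : List Int) (hQ : Q ∈ frontier) (R : List Int) (hR : R ∈ altSuccs n m Q) :
    R ∈ states ∨ R ∈ altCollect n m states frontier := by
  unfold altCollect
  have aux : ∀ (fr : List (List Int)) (acc : List (List Int)), Q ∈ fr →
      R ∈ states ∨ R ∈ fr.foldl (fun new Q => (altSuccs n m Q).foldl
        (fun new R => if R ∈ states ∨ R ∈ new then new else new ++ [R]) new) acc := by
    intro fr
    induction fr with
    | nil => intro _ h; cases h
    | cons x t ih =>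
      intro acc hx
      rcases List.mem_cons.mp hx with rfl | hQt
      · rcases inner_fold_mem states _ acc R hR with h | h
        · exact Or.inl h
        · right
          simp only [List.foldl_cons]
          exact collect_sub n m states t _ h
      · simpa only [List.foldl_cons] using ih _ hQt
  exact aux frontier [] hQ

def ClosedExcept (n m : Int) (states frontier : List (List Int)) : Prop :=
  ∀ Q ∈ states, Q ∉ frontier → ∀ R ∈ altSuccs n m Q, R ∈ states

theorem closed_reach (n m : Int) (states : List (List Int))
    (hc : ∀ Q ∈ states, ∀ R ∈ altSuccs n m Q, R ∈ states) :
    ∀ k (Q R : List Int), Q ∈ states → StepsN n m k Q R → R ∈ states := by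
  intro k Q R hQ h
  induction h with
  | zero => exact hQ
  | succ hM _ ih => exact ih (hc _ hQ _ hM)

theorem bfs_mem (n m : Int) : ∀ (f : Nat) (states frontier : List (List Int)),
    frontier ⊆ states → ClosedExcept n m states frontier →
    ∀ (k : Nat) (Q R : List Int), k ≤ f → Q ∈ states → StepsN n m k Q R →
      R ∈ altBFS n m f states frontier := by
  intro f
  induction f with
  | zero =>
    intro states frontier _ _ k Q R hk hQ hsteps
    interval_cases k
    cases hsteps
    exact hQ
  | succ f ih =>
    intro states frontier hsub hclosed k Q R hk hQ hsteps
    unfold altBFS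
    by_cases hfr : frontier = []
    · rw [if_pos hfr]
      subst hfr
      refine closed_reach n m states ?_ k Q R hQ hsteps
      intro Qx hQx Rx hRx
      exact hclosed Qx hQx (by simp) Rx hRx
    · rw [if_neg hfr]
      have hsub2 : altCollect n m states frontier ⊆ states ++ altCollect n m states frontier :=
        fun x hx => List.mem_append_right _ hx
      have hclosed2 : ClosedExcept n m (states ++ altCollect n m states frontier)
          (altCollect n m states frontier) := by
        intro Qx hQx hnotin Rx hRx
        rcases List.mem_append.mp hQx with h | h
        · by_cases hfrQ : Qx ∈ frontier
          · rcases collect_mem n m states frontier Qx hfrQ Rx hRx with h2 | h2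
            · exact List.mem_append_left _ h2
            · exact List.mem_append_right _ h2
          · exact List.mem_append_left _ (hclosed Qx h hfrQ Rx hRx)
        · exact absurd h hnotin
      cases hsteps with
      | zero =>
        exact ih _ _ hsub2 hclosed2 0 Q Q (by omega) (List.mem_append_left _ hQ) (StepsN.zero Q)
      | succ hM hrest =>
        rename_i k2 M
        have hMmem : M ∈ states ++ altCollect n m states frontier := by
          by_cases hfrQ : Q ∈ frontier
          · rcases collect_mem n m states frontier Q hfrQ M hM with h2 | h2
            · exact List.mem_append_left _ h2
            · exact List.mem_append_right _ h2
          · exact List.mem_append_left _ (hclosed Q hQ hfrQ M hM)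
        exact ih _ _ hsub2 hclosed2 k2 M R (by omega) hMmem hrest
-- ---- the Bellman table ----

theorem getD_foldl_insert_fn (l : List (List Int)) (f : List Int → Int) :
    ∀ (acc : PySem.Dict (List Int) Int) (key : List Int),
      (l.foldl (fun d Q => d.insert Q (f Q)) acc).getD key 0
        = if key ∈ l then f key else acc.getD key 0 := by
  induction l with
  | nil => intro acc key; simp
  | cons x t ih =>
    intro acc key
    simp only [List.foldl_cons]
    rw [ih]
    by_cases hkt : key ∈ t
    · simp [hkt]
    · rw [if_neg hkt, PySem.Dict.getD_insert]
      by_cases hkx : key = x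
      · simp [hkx]
      · simp [hkx, hkt]

theorem altIter_succ (n m : Int) (states : List (List Int)) :
    ∀ (k : Nat) (d : PySem.Dict (List Int) Int),
      altIter n m states (k + 1) d = altSweep n m states (altIter n m states k d) := by
  intro k
  induction k with
  | zero => intro d; rfl
  | succ k ih =>
    intro d
    show altIter n m states (k + 1) (altSweep n m states d) = _
    rw [ih (altSweep n m states d)]
    rfl

theorem StepsN_snoc (n m : Int) {k : Nat} {Q M R : List Int}
    (h : StepsN n m k Q M) (hR : R ∈ altSuccs n m M) : StepsN n m (k + 1) Q R := by
  induction h with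
  | zero => exact StepsN.succ hR (StepsN.zero R)
  | succ hM _ ih => exact StepsN.succ hM (ih hR)

theorem iter_getD (n m : Int) (P : List Int) :
    ∀ (k j : Nat) (Q : List Int), j + k ≤ pvBound n → StepsN n m j P Q →
      ((altIter n m (altBFS n m (pvBound n) [P] [P]) k
        ((altBFS n m (pvBound n) [P] [P]).foldl
          (fun d Q => d.insert Q (0 : Int)) PySem.Dict.empty)).getD Q 0)
        = dRec n m k Q := by
  intro k
  induction k with
  | zero =>
    intro j Q _ _
    show (List.foldl (fun d Q => d.insert Q (0 : Int)) PySem.Dict.empty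
      (altBFS n m (pvBound n) [P] [P])).getD Q 0 = dRec n m 0 Q
    rw [getD_foldl_insert_fn _ (fun _ => (0 : Int))]
    split <;> simp [dRec, PySem.Dict.getD_empty]
  | succ k ih =>
    intro j Q hjk hsteps
    have hQmem : Q ∈ altBFS n m (pvBound n) [P] [P] := by
      refine bfs_mem n m (pvBound n) [P] [P] (fun x h => h) ?_ j P Q (by omega) (by simp) hsteps
      intro Qx hQx hnot Rx hRx
      simp only [List.mem_singleton] at hQx
      exact absurd (by simp [hQx]) hnot
    rw [altIter_succ]
    unfold altSweep
    rw [getD_foldl_insert_fn _ _ _ Q, if_pos hQmem]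
    unfold altVal
    show (altSuccs n m Q).foldl _ 0 = (altSuccs n m Q).foldl _ 0
    apply PySem.List.foldl_congr_mem
    intro acc R hR
    beta_reduce
    rw [ih (j + 1) R (by omega) (StepsN_snoc n m hsteps hR)]
theorem MutualExclusion_spec' : ∀ (n : Int) (P : List Int) (step : Int),
    1 ≤ n → n ≤ (P.length : Int) →
    MutualExclusion n P step = MutualExclusion_alt n P step := by
  intro n P step h1 h2
  show MEgo (pvBound n) n P step
    = step + ((altIter n ((P.length : Int) + 1) (altBFS n ((P.length : Int) + 1) (pvBound n) [P] [P])
        (pvBound n)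
        ((altBFS n ((P.length : Int) + 1) (pvBound n) [P] [P]).foldl
          (fun d Q => d.insert Q (0 : Int)) PySem.Dict.empty)).getD P 0)
  rw [MEgo_eq n (pvBound n) P step h1 h2,
    iter_getD n ((P.length : Int) + 1) P (pvBound n) 0 P (by omega) (StepsN.zero P)]

-- ===== VERDICT (by name: the statement is the Claim_ definition above) =====
theorem MutualExclusion_spec : Claim_equal_MutualExclusion := by
  intro n P step _ hpre
  have hp := hpre
  unfold Pre_MutualExclusion at hp
  show MutualExclusion n P step = MutualExclusion_alt n P step
  exact MutualExclusion_spec' n P step hp.1 hp.2
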